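-- pv_equiv track=rewrite | github.com/XAHICO/vertigo | src/vertigo/core/scan/form_extractor.py | _classify_form
-- ===== SOURCE A (Python) =====
-- from typing import List, Dict, Any
--
-- def _classify_form(fields: List[Dict]) -> str:
--     field_names = [f["name"].lower() for f in fields]
--     if any("password" in n or "pass" in n for n in field_names):
--         return "login" if any("user" in n or "email" in n for n in field_names) else "password_change"
--     if any("search" in n or "query" in n or n == "q" for n in field_names):
--         return "search"
--     if any("email" in n or "message" in n or "contact" in n for n in field_names):
--         return "contact"
--     if len(fields) > 5 and any("email" in n for n in field_names):
--         return "registration"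
--     return "generic"
-- ===== SOURCE B (Python) =====
-- # Data-driven classifier: one token-extraction pass builds a set of matched
-- # keywords, then an ordered rule table is scanned for the first rule whose
-- # trigger tokens (and length bound) are satisfied.
--
-- _KEYWORDS = ("pass", "user", "email", "search", "query", "message", "contact")
--
-- _RULES = (
--     ("login", ("pass",), ("user", "email"), 0),
--     ("password_change", ("pass",), None, 0),
--     ("search", ("search", "query", "q"), None, 0),
--     ("contact", ("email", "message", "contact"), None, 0),
--     ("registration", ("email",), None, 6),
-- )
--
-- def _classify_form(fields):
--     tokens = set()
--     for f in fields:
--         n = f["name"].lower()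
--         for kw in _KEYWORDS:
--             if kw in n:
--                 tokens.add(kw)
--         if n == "q":
--             tokens.add("q")
--     for label, trigger, extra, min_len in _RULES:
--         if len(fields) >= min_len and not tokens.isdisjoint(trigger):
--             if extra is None or not tokens.isdisjoint(extra):
--                 return label
--     return "generic"
-- ===== Notes on version B (the rewrite author's own statement) =====
-- stated objective: alternative
-- what changed: A runs up to six substring any()-scans over a lowercased name list inside a hard-coded branch cascade; B instead extracts a set of matched keyword tokens in one pass and classifies by scanning a declarative ordered rule table (label, trigger tokens, optional extra tokens, minimum field count), returning the first satisfied rule's label.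
import Mathlib
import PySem

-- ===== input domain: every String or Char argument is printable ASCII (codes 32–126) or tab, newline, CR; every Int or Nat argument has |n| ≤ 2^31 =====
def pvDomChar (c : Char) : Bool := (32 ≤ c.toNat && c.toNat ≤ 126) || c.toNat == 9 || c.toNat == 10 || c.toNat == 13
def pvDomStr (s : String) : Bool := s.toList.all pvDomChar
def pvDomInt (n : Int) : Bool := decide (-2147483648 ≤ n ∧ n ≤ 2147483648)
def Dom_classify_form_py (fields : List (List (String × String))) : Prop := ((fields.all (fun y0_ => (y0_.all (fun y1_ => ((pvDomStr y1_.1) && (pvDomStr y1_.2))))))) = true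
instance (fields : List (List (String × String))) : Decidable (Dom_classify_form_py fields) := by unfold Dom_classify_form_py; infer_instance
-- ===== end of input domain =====

-- B is a data-driven classifier: one pass extracts the set of matched keyword tokens, then an
-- ordered rule table is scanned for the first satisfied rule; same return value everywhere on Pre_.

-- f["name"].lower(), appearing verbatim in both Pythons
def lname (f : List (String × String)) : String :=
  PySem.Str.lower ((PySem.Dict.mk f).getD "name" "")

-- ===== PORT A =====
def classify_form_py (fields : List (List (String × String))) : String :=
  let field_names := fields.map lname
  if field_names.any (fun n => PySem.Str.isIn "password" n || PySem.Str.isIn "pass" n) then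
    if field_names.any (fun n => PySem.Str.isIn "user" n || PySem.Str.isIn "email" n) then "login"
    else "password_change"
  else if field_names.any (fun n => PySem.Str.isIn "search" n || (PySem.Str.isIn "query" n || n == "q")) then "search"
  else if field_names.any (fun n => PySem.Str.isIn "email" n || (PySem.Str.isIn "message" n || PySem.Str.isIn "contact" n)) then "contact"
  else if decide (5 < fields.length) && field_names.any (fun n => PySem.Str.isIn "email" n) then "registration"
  else "generic"

-- ===== PORT B =====
def pvKeywords : List String := ["pass", "user", "email", "search", "query", "message", "contact"]

def pvRules : List (String × List String × Option (List String) × Nat) :=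
  [("login", ["pass"], some ["user", "email"], 0),
   ("password_change", ["pass"], none, 0),
   ("search", ["search", "query", "q"], none, 0),
   ("contact", ["email", "message", "contact"], none, 0),
   ("registration", ["email"], none, 6)]

-- token extraction for one field name
def tokenStep (n : String) (ts : PySem.Set String) : PySem.Set String :=
  let ts1 := pvKeywords.foldl (fun ts kw => if PySem.Str.isIn kw n then PySem.Set.add ts kw else ts) ts
  if n == "q" then PySem.Set.add ts1 "q" else ts1

-- first rule whose trigger (and length bound, and optional extra trigger) is satisfied
def ruleScan (flen : Nat) (tokens : PySem.Set String) :
    List (String × List String × Option (List String) × Nat) → String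
  | [] => "generic"
  | (label, trigger, extra, minLen) :: rest =>
    if decide (minLen ≤ flen) && !(PySem.Set.isdisjoint tokens trigger) then
      if (match extra with
          | none => true
          | some ex => !(PySem.Set.isdisjoint tokens ex)) then label
      else ruleScan flen tokens rest
    else ruleScan flen tokens rest

def classify_form_py_alt (fields : List (List (String × String))) : String :=
  let tokens := fields.foldl (fun ts f => tokenStep (lname f) ts) PySem.Set.empty
  ruleScan fields.length tokens pvRules

-- ===== PRECONDITION & SPEC =====
-- Pre_ excludes exactly the inputs where a field dict has no "name" key: there A raises KeyError.
def Pre_classify_form_py (fields : List (List (String × String))) : Prop :=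
  ∀ f ∈ fields, (PySem.Dict.mk f).contains "name" = true
instance (fields : List (List (String × String))) : Decidable (Pre_classify_form_py fields) := by
  unfold Pre_classify_form_py; infer_instance

def pvWitness_classify_form_py : (List (List (String × String))) :=
  [[("name", "Username")], [("name", "pass_word"), ("type", "password")]]

def Spec_classify_form_py (fields : List (List (String × String))) (out : String) : Prop := out = classify_form_py_alt fields
instance (fields : List (List (String × String))) (out : String) : Decidable (Spec_classify_form_py fields out) := by unfold Spec_classify_form_py; infer_instance

-- ===== CLAIM (what is proved, stated in full; the proofs are below) =====
def Claim_equal_classify_form_py : Prop := ∀ (fields : List (List (String × String))), Dom_classify_form_py fields → Pre_classify_form_py fields → Spec_classify_form_py fields (classify_form_py fields)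

-- ===== LEMMAS AND PROOFS =====

-- which token a single name n contributes
def tokHit (kw n : String) : Bool :=
  (decide (kw ∈ pvKeywords) && PySem.Str.isIn kw n) || (kw == "q" && n == "q")

theorem mem_keyword_foldl (l : List String) (n x : String) (ts : PySem.Set String) :
    x ∈ l.foldl (fun ts kw => if PySem.Str.isIn kw n then PySem.Set.add ts kw else ts) ts ↔
      x ∈ ts ∨ (x ∈ l ∧ PySem.Str.isIn x n = true) := by
  induction l generalizing ts with
  | nil => simp
  | cons kw rest ih =>
    simp only [List.foldl_cons]
    by_cases h : PySem.Str.isIn kw n = true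
    · rw [if_pos h, ih]
      simp only [PySem.Set.mem_add, List.mem_cons]
      constructor
      · rintro ((hts | rfl) | ⟨hm, hi⟩)
        · exact Or.inl hts
        · exact Or.inr ⟨Or.inl rfl, h⟩
        · exact Or.inr ⟨Or.inr hm, hi⟩
      · rintro (hts | ⟨(rfl | hm), hi⟩)
        · exact Or.inl (Or.inl hts)
        · exact Or.inl (Or.inr rfl)
        · exact Or.inr ⟨hm, hi⟩
    · rw [if_neg h, ih]
      simp only [List.mem_cons]
      constructor
      · rintro (hts | ⟨hm, hi⟩)
        · exact Or.inl hts
        · exact Or.inr ⟨Or.inr hm, hi⟩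
      · rintro (hts | ⟨(rfl | hm), hi⟩)
        · exact Or.inl hts
        · exact absurd hi h
        · exact Or.inr ⟨hm, hi⟩

theorem tokHit_iff (kw n : String) :
    tokHit kw n = true ↔ (kw ∈ pvKeywords ∧ PySem.Str.isIn kw n = true) ∨ (kw = "q" ∧ n = "q") := by
  simp [tokHit]

theorem mem_tokenStep (n x : String) (ts : PySem.Set String) :
    x ∈ tokenStep n ts ↔ x ∈ ts ∨ tokHit x n = true := by
  rw [tokHit_iff]
  unfold tokenStep
  by_cases hq : n = "q"
  · subst hq
    rw [if_pos (by simp)]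
    rw [PySem.Set.mem_add, mem_keyword_foldl]
    constructor
    · rintro ((hts | ⟨hm, hi⟩) | rfl)
      · exact Or.inl hts
      · exact Or.inr (Or.inl ⟨hm, hi⟩)
      · exact Or.inr (Or.inr ⟨rfl, rfl⟩)
    · rintro (hts | (⟨hm, hi⟩ | ⟨rfl, _⟩))
      · exact Or.inl (Or.inl hts)
      · exact Or.inl (Or.inr ⟨hm, hi⟩)
      · exact Or.inr rfl
  · rw [if_neg (by simpa using hq), mem_keyword_foldl]
    constructor
    · rintro (hts | ⟨hm, hi⟩)
      · exact Or.inl hts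
      · exact Or.inr (Or.inl ⟨hm, hi⟩)
    · rintro (hts | (⟨hm, hi⟩ | ⟨_, rfl⟩))
      · exact Or.inl hts
      · exact Or.inr ⟨hm, hi⟩
      · exact absurd rfl hq

theorem mem_tokens (fields : List (List (String × String))) (x : String) (ts : PySem.Set String) :
    x ∈ fields.foldl (fun ts f => tokenStep (lname f) ts) ts ↔
      x ∈ ts ∨ (fields.any (fun f => tokHit x (lname f))) = true := by
  induction fields generalizing ts with
  | nil => simp
  | cons f fs ih =>
    simp only [List.foldl_cons, List.any_cons, ih, mem_tokenStep, Bool.or_eq_true]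
    tauto

theorem not_isdisjoint_tokens (fields : List (List (String × String))) (trig : List String) :
    (!(PySem.Set.isdisjoint (fields.foldl (fun ts f => tokenStep (lname f) ts) PySem.Set.empty) trig))
      = fields.any (fun f => trig.any (fun kw => tokHit kw (lname f))) := by
  set tokens := fields.foldl (fun ts f => tokenStep (lname f) ts) PySem.Set.empty with htk
  cases h : fields.any (fun f => trig.any (fun kw => tokHit kw (lname f))) with
  | true =>
    simp only [Bool.not_eq_true']
    obtain ⟨f, hf, hkw⟩ := List.any_eq_true.mp h
    obtain ⟨kw, hkwt, hhit⟩ := List.any_eq_true.mp hkw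
    by_contra hd
    have hd' : PySem.Set.isdisjoint tokens trig = true := by
      cases hdd : PySem.Set.isdisjoint tokens trig
      · exact absurd hdd hd
      · rfl
    have := (PySem.Set.isdisjoint_iff tokens trig).mp hd' kw
      ((mem_tokens fields kw PySem.Set.empty).mpr
        (Or.inr (List.any_eq_true.mpr ⟨f, hf, hhit⟩)))
    exact this hkwt
  | false =>
    simp only [Bool.not_eq_false']
    apply (PySem.Set.isdisjoint_iff tokens trig).mpr
    intro x hx hxt
    rcases (mem_tokens fields x PySem.Set.empty).mp hx with hempty | hany
    · simp [PySem.Set.empty] at hempty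
    · obtain ⟨f, hf, hhit⟩ := List.any_eq_true.mp hany
      have : fields.any (fun f => trig.any (fun kw => tokHit kw (lname f))) = true :=
        List.any_eq_true.mpr ⟨f, hf, List.any_eq_true.mpr ⟨x, hxt, hhit⟩⟩
      rw [h] at this; exact Bool.false_ne_true this

-- "password" in n implies "pass" in n, so A's first disjunction collapses.
theorem pass_or (n : String) :
    (PySem.Str.isIn "password" n || PySem.Str.isIn "pass" n) = PySem.Str.isIn "pass" n := by
  cases hp : PySem.Str.isIn "pass" n with
  | true => simp
  | false =>
    cases hpw : PySem.Str.isIn "password" n with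
    | false => simp
    | true =>
      exfalso
      have h1 : ("password" : String).toList <:+: n.toList := (PySem.Str.isIn_iff_infix "password" n).mp hpw
      have h2 : ("pass" : String).toList <:+: ("password" : String).toList := by decide
      have h3 : PySem.Str.isIn "pass" n = true := (PySem.Str.isIn_iff_infix "pass" n).mpr (h2.trans h1)
      rw [hp] at h3; exact Bool.false_ne_true h3

theorem tokHit_of_kw (kw : String) (hkw : kw ∈ pvKeywords) (hne : (kw == "q") = false) (n : String) :
    tokHit kw n = PySem.Str.isIn kw n := by
  simp [tokHit, hkw, hne]

theorem tokHit_q (n : String) : tokHit "q" n = (n == "q") := by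
  simp [tokHit, pvKeywords]

-- ===== VERDICT (by name: the statement is the Claim_ definition above) =====
theorem classify_form_py_spec : Claim_equal_classify_form_py := by
  intro fields _ _
  unfold Spec_classify_form_py classify_form_py classify_form_py_alt
  simp only [pvRules, ruleScan, not_isdisjoint_tokens, List.any_map, Function.comp_def,
    List.any_cons, List.any_nil, Bool.or_false, tokHit_q,
    tokHit_of_kw "pass" (by simp [pvKeywords]) (by decide),
    tokHit_of_kw "user" (by simp [pvKeywords]) (by decide),
    tokHit_of_kw "email" (by simp [pvKeywords]) (by decide),
    tokHit_of_kw "search" (by simp [pvKeywords]) (by decide),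
    tokHit_of_kw "query" (by simp [pvKeywords]) (by decide),
    tokHit_of_kw "message" (by simp [pvKeywords]) (by decide),
    tokHit_of_kw "contact" (by simp [pvKeywords]) (by decide),
    pass_or, Nat.zero_le, decide_true, Bool.true_and]
  have h56 : decide (5 < fields.length) = decide (6 ≤ fields.length) := rfl
  rw [h56]
  split_ifs <;> simp_all
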